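-- pv_equiv track=rewrite | github.com/prvnlhr/Python-DSA | Data Structure/450 DSA Questions/Dynamic Programming/2. ByteLandian.py | bytelandianRec
-- ===== SOURCE A (Python) =====
-- def bytelandianRec(n):
--     if n == 0 or n == 1:
--         return n
--
--     ans1 = bytelandianRec(n // 2)
--     ans2 = bytelandianRec(n // 3)
--     ans3 = bytelandianRec(n // 4)
--     ans = ans1 + ans2 + ans3
--     return max(n, ans)
-- ===== SOURCE B (Python) =====
-- def bytelandianRec(n):
--     memo = {}
--
--     def go(n):
--         if n in memo:
--             return memo[n]
--         if n == 0 or n == 1: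
--             res = n
--         else:
--             res = max(n, go(n // 2) + go(n // 3) + go(n // 4))
--         memo[n] = res
--         return res
--
--     return go(n)
-- ===== Notes on version B (the rewrite author's own statement) =====
-- stated objective: faster
-- what changed: B replaces A's naive exponential triple recursion by top-down memoization on a dict keyed by n, so each distinct subproblem is solved once.
import Mathlib
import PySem

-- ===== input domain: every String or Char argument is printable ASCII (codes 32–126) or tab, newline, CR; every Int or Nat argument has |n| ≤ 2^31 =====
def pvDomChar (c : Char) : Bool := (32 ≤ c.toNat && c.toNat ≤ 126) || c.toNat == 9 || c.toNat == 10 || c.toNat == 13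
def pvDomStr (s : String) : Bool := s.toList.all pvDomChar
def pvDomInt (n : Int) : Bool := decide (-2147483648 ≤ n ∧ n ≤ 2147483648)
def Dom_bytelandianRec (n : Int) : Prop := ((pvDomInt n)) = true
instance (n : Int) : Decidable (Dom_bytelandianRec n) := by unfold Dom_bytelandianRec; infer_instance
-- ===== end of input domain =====

-- B replaces A's naive exponential triple recursion by top-down memoization on a
-- dict keyed by n (each distinct subproblem solved once) — objective: faster.
-- Both Pythons infinitely recurse (RecursionError) on negative input, hence Pre_.

-- ===== PORT A =====
-- A recurses on n // 2, n // 3, n // 4; for n ≥ 0 Python's // equals Nat division,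
-- so the recursion is carried out on Nat (exact on Pre_; on negative input A raises).
def bytelandianRecNat (n : Nat) : Int :=
  if n = 0 ∨ n = 1 then (n : Int)
  else
    let ans1 := bytelandianRecNat (n / 2)
    let ans2 := bytelandianRecNat (n / 3)
    let ans3 := bytelandianRecNat (n / 4)
    let ans := ans1 + ans2 + ans3
    max (n : Int) ans
termination_by n
decreasing_by all_goals omega

def bytelandianRec (n : Int) : Int := bytelandianRecNat n.toNat

-- ===== PORT B =====
-- go threads the memo dict through the three recursive calls, exactly as Source B's
-- closure mutates `memo`; keys are the Python ints.
def bytelandianGo (n : Nat) (memo : PySem.Dict Int Int) : Int × PySem.Dict Int Int :=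
  match memo.get? (n : Int) with
  | some v => (v, memo)
  | none =>
    if n = 0 ∨ n = 1 then ((n : Int), memo.insert (n : Int) (n : Int))
    else
      let p1 := bytelandianGo (n / 2) memo
      let p2 := bytelandianGo (n / 3) p1.2
      let p3 := bytelandianGo (n / 4) p2.2
      let res := max (n : Int) (p1.1 + p2.1 + p3.1)
      (res, p3.2.insert (n : Int) res)
termination_by n
decreasing_by all_goals omega

def bytelandianRec_alt (n : Int) : Int := (bytelandianGo n.toNat PySem.Dict.empty).1

-- ===== PRECONDITION & SPEC =====
-- Pre_ excludes negative n, where both A and B hit unbounded recursion (RecursionError).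
def Pre_bytelandianRec (n : Int) : Prop := 0 ≤ n
instance (n : Int) : Decidable (Pre_bytelandianRec n) := by unfold Pre_bytelandianRec; infer_instance
def pvWitness_bytelandianRec : Int := (12)

def Spec_bytelandianRec (n : Int) (out : Int) : Prop := out = bytelandianRec_alt n
instance (n : Int) (out : Int) : Decidable (Spec_bytelandianRec n out) := by unfold Spec_bytelandianRec; infer_instance

-- ===== CLAIM (what is proved, stated in full; the proofs are below) =====
def Claim_equal_bytelandianRec : Prop := ∀ (n : Int), Dom_bytelandianRec n → Pre_bytelandianRec n → Spec_bytelandianRec n (bytelandianRec n)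

-- ===== LEMMAS AND PROOFS =====

-- memo invariant: every stored value is the true answer of its key
def MemoInv (m : PySem.Dict Int Int) : Prop :=
  ∀ (k : Nat) (v : Int), m.get? (k : Int) = some v → v = bytelandianRecNat k

theorem bytelandianGo_correct (n : Nat) (memo : PySem.Dict Int Int) (h : MemoInv memo) :
    (bytelandianGo n memo).1 = bytelandianRecNat n ∧ MemoInv (bytelandianGo n memo).2 := by
  induction n using Nat.strong_induction_on generalizing memo with
  | _ n ih =>
    rw [bytelandianGo]
    cases hg : memo.get? (n : Int) with
    | some v =>
      exact ⟨h n v hg, h⟩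
    | none =>
      by_cases hb : n = 0 ∨ n = 1
      · simp only [hb, if_true]
        refine ⟨by rw [bytelandianRecNat]; simp [hb], ?_⟩
        intro k v hk
        rw [PySem.Dict.get?_insert] at hk
        split_ifs at hk with he
        · have : k = n := by exact_mod_cast he
          subst this
          rw [bytelandianRecNat]
          simp [hb, ← Option.some_inj.mp hk]
        · exact h k v hk
      · simp only [hb, if_false]
        have h2 : n / 2 < n := by omega
        have h3 : n / 3 < n := by omega
        have h4 : n / 4 < n := by omega
        obtain ⟨e1, i1⟩ := ih (n / 2) h2 memo h
        obtain ⟨e2, i2⟩ := ih (n / 3) h3 _ i1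
        obtain ⟨e3, i3⟩ := ih (n / 4) h4 _ i2
        refine ⟨?_, ?_⟩
        · show max (n : Int) _ = _
          rw [bytelandianRecNat]
          simp only [hb, if_false]
          rw [e1, e2, e3]
        · intro k v hk
          rw [PySem.Dict.get?_insert] at hk
          split_ifs at hk with he
          · have : k = n := by exact_mod_cast he
            subst this
            rw [bytelandianRecNat]
            simp only [hb, if_false]
            rw [← Option.some_inj.mp hk, e1, e2, e3]
          · exact i3 k v hk

-- ===== VERDICT (by name: the statement is the Claim_ definition above) =====
theorem bytelandianRec_spec : Claim_equal_bytelandianRec := by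
  intro n _ _
  unfold Spec_bytelandianRec bytelandianRec bytelandianRec_alt
  have h0 : MemoInv PySem.Dict.empty := by
    intro k v hk
    simp [PySem.Dict.get?_empty] at hk
  exact (bytelandianGo_correct n.toNat PySem.Dict.empty h0).1.symm
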